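-- pv_equiv track=rewrite | github.com/Sonnlicht/chess-bot | main.py | find_moved_pieces
-- ===== SOURCE A (Python) =====
-- def find_moved_pieces(old_state, new_state):
--     """Compare two board states to find moved pieces"""
--     # Find pieces that are in new positions
--     appeared = {pos: piece for pos, piece in new_state.items()
--                if pos not in old_state or old_state[pos] != piece}
--
--     # Find pieces that disappeared from their old positions
--     disappeared = {pos: piece for pos, piece in old_state.items()
--                  if pos not in new_state or new_state[pos] != piece}
--
--     # Group by piece type to find moves
--     moves = []
--     for old_pos, old_piece in disappeared.items():
--         for new_pos, new_piece in appeared.items():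
--             if old_piece == new_piece:
--                 moves.append((old_pos, new_pos, old_piece))
--                 # Remove these items to avoid duplicate matching
--                 appeared.pop(new_pos)
--                 break
--
--     return moves
-- ===== SOURCE B (Python) =====
-- def find_moved_pieces(old_state, new_state):
--     """Compare two board states to find moved pieces"""
--     # One pass over new_state: FIFO queues of appeared positions, grouped by piece type.
--     queues = {}
--     for pos, piece in new_state.items():
--         if old_state.get(pos) != piece:
--             queues.setdefault(piece, []).append(pos)
--     # One pass over old_state: each disappeared piece takes the front of its type's queue.
--     heads = {}
--     moves = []
--     for pos, piece in old_state.items():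
--         if new_state.get(pos) != piece:
--             q = queues.get(piece, ())
--             i = heads.get(piece, 0)
--             if i < len(q):
--                 moves.append((pos, q[i], piece))
--                 heads[piece] = i + 1
--     return moves
-- ===== Notes on version B (the rewrite author's own statement) =====
-- stated objective: faster
-- what changed: Replaces the quadratic rescan of the appeared-dict (with pop-on-match) by one grouping pass that builds per-piece-type FIFO queues of appeared positions plus one pass over old_state popping the queue front per disappeared piece.
import Mathlib
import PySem

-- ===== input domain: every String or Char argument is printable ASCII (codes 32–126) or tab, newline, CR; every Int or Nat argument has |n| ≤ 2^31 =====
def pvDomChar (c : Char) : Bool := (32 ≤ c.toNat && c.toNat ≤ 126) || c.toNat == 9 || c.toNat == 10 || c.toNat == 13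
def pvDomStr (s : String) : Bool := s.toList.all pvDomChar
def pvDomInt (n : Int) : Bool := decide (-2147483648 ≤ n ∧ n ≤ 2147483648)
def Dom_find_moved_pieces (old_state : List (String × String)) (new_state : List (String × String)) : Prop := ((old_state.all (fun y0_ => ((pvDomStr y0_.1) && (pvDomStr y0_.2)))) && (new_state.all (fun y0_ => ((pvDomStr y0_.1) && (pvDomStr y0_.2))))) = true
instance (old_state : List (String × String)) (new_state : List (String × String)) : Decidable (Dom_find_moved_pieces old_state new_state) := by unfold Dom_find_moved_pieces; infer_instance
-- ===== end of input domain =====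

-- ===== PORT A =====
def pvFindMatch (app : List (String × String)) (piece : String) : Option String :=
  match app with
  | [] => none
  | (np, npc) :: rest => if npc == piece then some np else pvFindMatch rest piece

-- A's moves loop: the appeared dict is carried as its items list (its keys are unique);
-- appeared.pop(new_pos) is removal by key, exactly PySem.Dict.erase's filter.
def pvALoop (dis : List (String × String)) (app : List (String × String))
    (moves : List (String × String × String)) : List (String × String × String) :=
  match dis with
  | [] => moves
  | (op, opc) :: rest =>
    match pvFindMatch app opc with
    | some np => pvALoop rest (app.filter (fun p => !(p.1 == np))) (moves ++ [(op, np, opc)])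
    | none => pvALoop rest app moves

def find_moved_pieces (old_state : List (String × String)) (new_state : List (String × String)) : List (String × String × String) :=
  let O := PySem.Dict.ofList old_state
  let N := PySem.Dict.ofList new_state
  let appeared := N.items.filter (fun p => (!(O.contains p.1)) || !(O.get? p.1 == some p.2))
  let disappeared := O.items.filter (fun p => (!(N.contains p.1)) || !(N.get? p.1 == some p.2))
  pvALoop disappeared appeared []

-- ===== PORT B =====
-- B: one grouping pass (per-piece FIFO queues of appeared positions), one pass over old_state
def pvBLoop (dis : List (String × String)) (N : PySem.Dict String String)
    (queues : PySem.Dict String (List String)) (heads : PySem.Dict String Int)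
    (moves : List (String × String × String)) : List (String × String × String) :=
  match dis with
  | [] => moves
  | (op, opc) :: rest =>
    if !(N.get? op == some opc) then
      let q := queues.getD opc []
      let i := heads.getD opc 0
      if i < (q.length : Int) then
        pvBLoop rest N queues (heads.insert opc (i + 1)) (moves ++ [(op, PySem.List.pyGetD q i "", opc)])
      else pvBLoop rest N queues heads moves
    else pvBLoop rest N queues heads moves

def find_moved_pieces_alt (old_state : List (String × String)) (new_state : List (String × String)) : List (String × String × String) :=
  let O := PySem.Dict.ofList old_state
  let N := PySem.Dict.ofList new_state
  let queues := N.items.foldl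
    (fun d p => if !(O.get? p.1 == some p.2) then d.modify p.2 [] (· ++ [p.1]) else d)
    PySem.Dict.empty
  pvBLoop O.items N queues PySem.Dict.empty []

-- ===== PRECONDITION & SPEC =====
def Spec_find_moved_pieces (old_state : List (String × String)) (new_state : List (String × String)) (out : List (String × String × String)) : Prop := out = find_moved_pieces_alt old_state new_state
instance (old_state : List (String × String)) (new_state : List (String × String)) (out : List (String × String × String)) : Decidable (Spec_find_moved_pieces old_state new_state out) := by unfold Spec_find_moved_pieces; infer_instance

-- ===== CLAIM (what is proved, stated in full; the proofs are below) =====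
def Claim_equal_find_moved_pieces : Prop := ∀ (old_state : List (String × String)) (new_state : List (String × String)), Dom_find_moved_pieces old_state new_state → Spec_find_moved_pieces old_state new_state (find_moved_pieces old_state new_state)

-- ===== LEMMAS AND PROOFS =====

-- proof-side form of B's loop: the disappeared-filter applied up front instead of an inline guard
def pvBLoop' (dis : List (String × String)) (queues : PySem.Dict String (List String))
    (heads : PySem.Dict String Int) (moves : List (String × String × String)) :
    List (String × String × String) :=
  match dis with
  | [] => moves
  | (op, opc) :: rest =>
    let q := queues.getD opc []
    let i := heads.getD opc 0
    if i < (q.length : Int) then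
      pvBLoop' rest queues (heads.insert opc (i + 1)) (moves ++ [(op, PySem.List.pyGetD q i "", opc)])
    else pvBLoop' rest queues heads moves

lemma pvBLoop_eq_filter (dis : List (String × String)) (N : PySem.Dict String String)
    (queues : PySem.Dict String (List String)) (heads : PySem.Dict String Int)
    (moves : List (String × String × String)) :
    pvBLoop dis N queues heads moves
      = pvBLoop' (dis.filter (fun p => !(N.get? p.1 == some p.2))) queues heads moves := by
  induction dis generalizing heads moves with
  | nil => rfl
  | cons p rest ih =>
    obtain ⟨op, opc⟩ := p
    by_cases hg : (!(N.get? op == some opc)) = true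
    · simp only [pvBLoop, List.filter_cons, hg, if_true, pvBLoop']
      split_ifs with hlt
      · exact ih _ _
      · exact ih _ _
    · simp only [pvBLoop, List.filter_cons, hg, if_false, Bool.false_eq_true]
      exact ih _ _

lemma pvFindMatch_eq (app : List (String × String)) (c : String) :
    pvFindMatch app c = (List.map Prod.fst (app.filter (fun p => p.2 == c))).head? := by
  induction app with
  | nil => rfl
  | cons p rest ih =>
    obtain ⟨np, npc⟩ := p
    by_cases h : (npc == c) = true <;> simp [pvFindMatch, h, ih]

-- the invariant tying A's remaining appeared-list to B's fixed queues plus head indices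
def pvInv (app : List (String × String)) (queues : PySem.Dict String (List String))
    (heads : PySem.Dict String Int) : Prop :=
  (app.map Prod.fst).Nodup ∧
  ∀ c : String, ∃ h : Nat,
    heads.getD c 0 = (h : Int) ∧ h ≤ (queues.getD c []).length ∧
    List.map Prod.fst (app.filter (fun p => p.2 == c)) = (queues.getD c []).drop h

lemma pvHead_mem (app : List (String × String)) (np c : String)
    (hhd : (List.map Prod.fst (app.filter (fun p => p.2 == c))).head? = some np) :
    (np, c) ∈ app := by
  cases hFc : app.filter (fun p => p.2 == c) with
  | nil => rw [hFc] at hhd; simp at hhd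
  | cons p0 T =>
    rw [hFc] at hhd
    have hp1 : p0.1 = np := by simpa using hhd
    have hp0 : p0 ∈ app.filter (fun p => p.2 == c) := by rw [hFc]; exact List.mem_cons_self
    have hp2 : p0.2 = c := by
      have := List.of_mem_filter hp0
      simpa using this
    have : p0 ∈ app := List.mem_of_mem_filter hp0
    rwa [show (np, c) = p0 from by rw [← hp1, ← hp2]]

lemma pvFilter_remove_ne (app : List (String × String)) (np c c' : String)
    (hnd : (app.map Prod.fst).Nodup)
    (hhd : (List.map Prod.fst (app.filter (fun p => p.2 == c))).head? = some np)
    (hne : c' ≠ c) :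
    (app.filter (fun p => !(p.1 == np))).filter (fun p => p.2 == c')
      = app.filter (fun p => p.2 == c') := by
  have hmem : (np, c) ∈ app := pvHead_mem app np c hhd
  rw [List.filter_filter]
  refine List.filter_congr ?_
  intro p hp
  by_cases hk : p.1 = np
  · have : p = (np, c) := List.inj_on_of_nodup_map hnd hp hmem hk
    subst this
    simp [Ne.symm hne]
  · simp [hk]

lemma pvFilter_remove_head (app : List (String × String)) (np c : String)
    (hnd : (app.map Prod.fst).Nodup)
    (hhd : (List.map Prod.fst (app.filter (fun p => p.2 == c))).head? = some np) :
    List.map Prod.fst ((app.filter (fun p => !(p.1 == np))).filter (fun p => p.2 == c))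
      = (List.map Prod.fst (app.filter (fun p => p.2 == c))).tail := by
  have hcomm : (app.filter (fun p => !(p.1 == np))).filter (fun p => p.2 == c)
      = (app.filter (fun p => p.2 == c)).filter (fun p => !(p.1 == np)) := by
    rw [List.filter_filter, List.filter_filter]
    exact List.filter_congr (fun p _ => by rw [Bool.and_comm])
  rw [hcomm]
  have hFnd : ((app.filter (fun p => p.2 == c)).map Prod.fst).Nodup :=
    (List.filter_sublist.map Prod.fst).nodup hnd
  cases hFc : app.filter (fun p => p.2 == c) with
  | nil => simp
  | cons p0 T =>
    rw [hFc] at hhd hFnd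
    have hp1 : p0.1 = np := by simpa using hhd
    have hnp : np ∉ T.map Prod.fst := by
      rw [List.map_cons, List.nodup_cons, hp1] at hFnd
      exact hFnd.1
    have hT : T.filter (fun p => !(p.1 == np)) = T := by
      refine List.filter_eq_self.mpr ?_
      intro p hp
      have : p.1 ≠ np := fun h => hnp (h ▸ List.mem_map_of_mem hp)
      simp [this]
    simp [hp1, hT]

lemma pvALoop_eq_pvBLoop' (dis : List (String × String)) (app : List (String × String))
    (queues : PySem.Dict String (List String)) (heads : PySem.Dict String Int)
    (moves : List (String × String × String)) (hinv : pvInv app queues heads) :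
    pvALoop dis app moves = pvBLoop' dis queues heads moves := by
  induction dis generalizing app heads moves with
  | nil => rfl
  | cons p rest ih =>
    obtain ⟨op, opc⟩ := p
    obtain ⟨hnd, hQ⟩ := hinv
    obtain ⟨h, hh, hle, hfil⟩ := hQ opc
    cases hdrop : (queues.getD opc []).drop h with
    | nil =>
      have hfm : pvFindMatch app opc = none := by
        rw [pvFindMatch_eq, hfil, hdrop]; rfl
      have hge : ¬ (heads.getD opc 0 < ((queues.getD opc []).length : Int)) := by
        have hlen : (queues.getD opc []).length ≤ h := List.drop_eq_nil_iff.mp hdrop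
        rw [hh]
        exact_mod_cast Nat.not_lt.mpr hlen
      simp only [pvALoop, pvBLoop', hfm]
      rw [if_neg hge]
      exact ih _ _ _ ⟨hnd, hQ⟩
    | cons np T =>
      have hlt : h < (queues.getD opc []).length := by
        by_contra hcon
        rw [List.drop_eq_nil_of_le (Nat.le_of_not_lt hcon)] at hdrop
        simp at hdrop
      have hsplit : (queues.getD opc [])[h] :: (queues.getD opc []).drop (h + 1) = np :: T := by
        rw [List.getElem_cons_drop hlt, hdrop]
      have hget : (queues.getD opc [])[h] = np := (List.cons_eq_cons.mp hsplit).1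
      have hdrop1 : (queues.getD opc []).drop (h + 1) = T := (List.cons_eq_cons.mp hsplit).2
      have hfm : pvFindMatch app opc = some np := by
        rw [pvFindMatch_eq, hfil, hdrop]; rfl
      have hhd : (List.map Prod.fst (app.filter (fun p => p.2 == opc))).head? = some np := by
        rw [hfil, hdrop]; rfl
      have hilt : heads.getD opc 0 < ((queues.getD opc []).length : Int) := by
        rw [hh]; exact_mod_cast hlt
      have hgetD : PySem.List.pyGetD (queues.getD opc []) (heads.getD opc 0) "" = np := by
        rw [hh, PySem.List.pyGetD_natCast, List.getD_eq_getElem _ _ hlt, hget]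
      simp only [pvALoop, pvBLoop', hfm]
      rw [if_pos hilt, hgetD]
      refine ih _ _ _ ⟨(List.filter_sublist.map Prod.fst).nodup hnd, ?_⟩
      intro c
      by_cases hc : c = opc
      · subst hc
        refine ⟨h + 1, ?_, hlt, ?_⟩
        · rw [PySem.Dict.getD_insert_self, hh]; push_cast; ring
        · rw [pvFilter_remove_head app np c hnd hhd, hfil, hdrop, hdrop1]
          rfl
      · obtain ⟨h', hh', hle', hfil'⟩ := hQ c
        refine ⟨h', ?_, hle', ?_⟩
        · rw [PySem.Dict.getD_insert_of_ne _ _ _ hc, hh']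
        · rw [pvFilter_remove_ne app np opc c hnd hhd hc, hfil']

lemma pvInv_init (app0 : List (String × String)) (hnd : (app0.map Prod.fst).Nodup) :
    pvInv app0 (app0.foldl (fun d p => d.modify p.2 [] (· ++ [p.1])) PySem.Dict.empty)
      PySem.Dict.empty := by
  refine ⟨hnd, fun c => ⟨0, by simp, ?_, ?_⟩⟩
  all_goals
    have hq : (app0.foldl (fun d p => d.modify p.2 [] (· ++ [p.1])) PySem.Dict.empty).getD c []
        = List.map Prod.fst (app0.filter (fun p => p.2 == c)) := by
      have hmap := PySem.Dict.getD_foldl_modify_append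
        (app0.map (fun p => (p.2, p.1))) PySem.Dict.empty c
      rw [List.foldl_map] at hmap
      simpa [List.filter_map, List.map_map, Function.comp] using hmap
  · rw [hq]; exact Nat.zero_le _
  · rw [hq, List.drop_zero]

lemma pvCond_eq (d : PySem.Dict String String) (p : String × String) :
    ((!(d.contains p.1)) || !(d.get? p.1 == some p.2)) = !(d.get? p.1 == some p.2) := by
  rw [PySem.Dict.contains_eq_isSome_get?]
  cases d.get? p.1 <;> simp

-- ===== VERDICT (by name: the statement is the Claim_ definition above) =====
theorem find_moved_pieces_spec : Claim_equal_find_moved_pieces := by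
  intro old_state new_state _
  show find_moved_pieces old_state new_state = find_moved_pieces_alt old_state new_state
  unfold find_moved_pieces find_moved_pieces_alt
  dsimp only
  rw [List.filter_congr (fun p _ => pvCond_eq (PySem.Dict.ofList old_state) p),
      List.filter_congr (fun p _ => pvCond_eq (PySem.Dict.ofList new_state) p),
      pvBLoop_eq_filter, ← List.foldl_filter]
  apply pvALoop_eq_pvBLoop'
  apply pvInv_init
  exact (List.filter_sublist.map Prod.fst).nodup (PySem.Dict.nodup_keys_ofList new_state)
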